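-- pv_equiv track=rewrite | github.com/Snoker/AutoCreateViewsForWork | test.py | addSpacingBeg
-- ===== SOURCE A (Python) =====
-- def addSpacingBeg(fullString,stringShortener,maxLen):
--     i = 0
--     finalString = fullString
--     maxLen = maxLen - len(stringShortener)
--     while i <= maxLen:
--         finalString = ' ' + finalString
--         i = i + 1
--     return finalString
-- ===== SOURCE B (Python) =====
-- def addSpacingBeg(fullString, stringShortener, maxLen):
--     return ' ' * (maxLen - len(stringShortener) + 1) + fullString
-- ===== Notes on version B (the rewrite author's own statement) =====
-- stated objective: simpler
-- what changed: Replaced the character-by-character while-loop prepend with a closed-form string repetition ' ' * (maxLen - len(stringShortener) + 1) prepended once.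
import Mathlib
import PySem

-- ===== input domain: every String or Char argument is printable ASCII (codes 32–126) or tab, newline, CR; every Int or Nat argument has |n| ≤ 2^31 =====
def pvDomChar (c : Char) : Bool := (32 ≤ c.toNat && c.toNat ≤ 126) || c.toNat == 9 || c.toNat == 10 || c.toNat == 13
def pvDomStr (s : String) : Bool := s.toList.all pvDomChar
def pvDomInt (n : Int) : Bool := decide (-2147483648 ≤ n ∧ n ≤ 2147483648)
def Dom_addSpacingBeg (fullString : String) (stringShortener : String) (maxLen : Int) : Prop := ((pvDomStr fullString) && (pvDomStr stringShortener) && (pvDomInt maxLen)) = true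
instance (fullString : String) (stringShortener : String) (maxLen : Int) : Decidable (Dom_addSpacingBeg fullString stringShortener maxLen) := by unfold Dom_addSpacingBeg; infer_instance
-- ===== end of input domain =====

-- B replaces A's one-space-at-a-time while loop by a single closed-form space repetition (simpler).
-- ===== PORT A =====
-- the while loop of A: state (i, finalString); Python's maxLen after the reassignment is the parameter here
def addSpacingBegLoop (maxLen : Int) (i : Int) (finalString : List Char) : List Char :=
  if i ≤ maxLen then addSpacingBegLoop maxLen (i + 1) (' ' :: finalString) else finalString
termination_by (maxLen + 1 - i).toNat
decreasing_by omega

def addSpacingBeg (fullString : String) (stringShortener : String) (maxLen : Int) : String :=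
  String.ofList (addSpacingBegLoop (maxLen - PySem.Str.len stringShortener) 0 fullString.toList)

-- ===== PORT B =====
def addSpacingBeg_alt (fullString : String) (stringShortener : String) (maxLen : Int) : String :=
  String.ofList (List.replicate (maxLen - PySem.Str.len stringShortener + 1).toNat ' ' ++ fullString.toList)

-- ===== PRECONDITION & SPEC =====
def Spec_addSpacingBeg (fullString : String) (stringShortener : String) (maxLen : Int) (out : String) : Prop := out = addSpacingBeg_alt fullString stringShortener maxLen
instance (fullString : String) (stringShortener : String) (maxLen : Int) (out : String) : Decidable (Spec_addSpacingBeg fullString stringShortener maxLen out) := by unfold Spec_addSpacingBeg; infer_instance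

-- ===== CLAIM (what is proved, stated in full; the proofs are below) =====
def Claim_equal_addSpacingBeg : Prop := ∀ (fullString : String) (stringShortener : String) (maxLen : Int), Dom_addSpacingBeg fullString stringShortener maxLen → Spec_addSpacingBeg fullString stringShortener maxLen (addSpacingBeg fullString stringShortener maxLen)

-- ===== LEMMAS AND PROOFS =====

-- ===== VERDICT (by name: the statement is the Claim_ definition above) =====
theorem addSpacingBegLoop_eq (maxLen i : Int) (fs : List Char) :
    addSpacingBegLoop maxLen i fs = List.replicate (maxLen + 1 - i).toNat ' ' ++ fs := by
  rw [addSpacingBegLoop]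
  split
  · rw [addSpacingBegLoop_eq maxLen (i + 1),
      show (maxLen + 1 - i).toNat = (maxLen + 1 - (i + 1)).toNat + 1 from by omega,
      List.replicate_succ']
    simp
  · rw [show (maxLen + 1 - i).toNat = 0 from by omega]
    simp
termination_by (maxLen + 1 - i).toNat
decreasing_by omega

theorem addSpacingBeg_spec : Claim_equal_addSpacingBeg := by
  intro f s m _
  unfold Spec_addSpacingBeg addSpacingBeg addSpacingBeg_alt
  rw [addSpacingBegLoop_eq]
  norm_num
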